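-- pv_equiv track=rewrite | github.com/PalakB09/Privacy-Preserving-Federated-Learning | demo/renderers.py | render_round_progress
-- ===== SOURCE A (Python) =====
-- def render_round_progress(current_round: int, total_rounds: int) -> str:
--     pills = []
--     for r in range(1, total_rounds + 1):
--         if r < current_round:
--             cls = "round-pill round-done"
--         elif r == current_round:
--             cls = "round-pill round-active"
--         else:
--             cls = "round-pill round-pending"
--         pills.append(f'<span class="{cls}">Round {r}</span>')
--     return "".join(pills)
-- ===== SOURCE B (Python) =====
-- def render_round_progress(current_round: int, total_rounds: int) -> str:
--     def pill(cls, r):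
--         return f'<span class="{cls}">Round {r}</span>'
--     done = [pill("round-pill round-done", r)
--             for r in range(1, min(current_round, total_rounds + 1))]
--     active = ([pill("round-pill round-active", current_round)]
--               if 1 <= current_round <= total_rounds else [])
--     pending = [pill("round-pill round-pending", r)
--                for r in range(max(current_round + 1, 1), total_rounds + 1)]
--     return "".join(done + active + pending)
-- ===== Notes on version B (the rewrite author's own statement) =====
-- stated objective: alternative
-- what changed: Replaces the single loop with a per-element three-way branch by three condition-free segment builds (done / active / pending) over clamped disjoint index ranges, concatenated in order.
import Mathlib
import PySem

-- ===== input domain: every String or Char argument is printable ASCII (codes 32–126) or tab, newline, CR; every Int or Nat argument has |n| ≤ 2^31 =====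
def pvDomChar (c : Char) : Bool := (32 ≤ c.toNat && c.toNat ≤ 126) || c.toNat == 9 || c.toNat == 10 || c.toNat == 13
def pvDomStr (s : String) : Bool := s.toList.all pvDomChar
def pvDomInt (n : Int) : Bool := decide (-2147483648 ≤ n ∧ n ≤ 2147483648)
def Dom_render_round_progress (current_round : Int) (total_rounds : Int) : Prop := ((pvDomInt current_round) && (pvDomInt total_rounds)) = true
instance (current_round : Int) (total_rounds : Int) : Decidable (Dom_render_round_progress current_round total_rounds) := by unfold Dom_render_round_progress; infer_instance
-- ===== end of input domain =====

-- B builds the pill list as three condition-free clamped segments (done/active/pending) instead of branching inside one loop; same cost, different decomposition.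


-- ===== PORT A =====
-- f'<span class="{cls}">Round {r}</span>'
def pvPillA (cls : String) (r : Int) : String :=
  "<span class=\"" ++ cls ++ "\">Round " ++ PySem.Int.toStr r ++ "</span>"

def render_round_progress (current_round : Int) (total_rounds : Int) : String :=
  let pills :=
    (PySem.List.pyRange 1 (total_rounds + 1) 1).foldl (fun acc r =>
      let cls :=
        if r < current_round then "round-pill round-done"
        else if r = current_round then "round-pill round-active"
        else "round-pill round-pending"
      acc ++ [pvPillA cls r]) []
  PySem.Str.join "" pills

-- ===== PORT B =====
-- f'<span class="{cls}">Round {r}</span>'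
def pvPillB (cls : String) (r : Int) : String :=
  "<span class=\"" ++ cls ++ "\">Round " ++ PySem.Int.toStr r ++ "</span>"

def render_round_progress_alt (current_round : Int) (total_rounds : Int) : String :=
  let done := (PySem.List.pyRange 1 (min current_round (total_rounds + 1)) 1).map
    (fun r => pvPillB "round-pill round-done" r)
  let active := if 1 ≤ current_round ∧ current_round ≤ total_rounds
    then [pvPillB "round-pill round-active" current_round] else []
  let pending := (PySem.List.pyRange (max (current_round + 1) 1) (total_rounds + 1) 1).map
    (fun r => pvPillB "round-pill round-pending" r)
  PySem.Str.join "" (done ++ active ++ pending)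

-- ===== PRECONDITION & SPEC =====
def Spec_render_round_progress (current_round : Int) (total_rounds : Int) (out : String) : Prop := out = render_round_progress_alt current_round total_rounds
instance (current_round : Int) (total_rounds : Int) (out : String) : Decidable (Spec_render_round_progress current_round total_rounds out) := by unfold Spec_render_round_progress; infer_instance

-- ===== CLAIM (what is proved, stated in full; the proofs are below) =====
def Claim_equal_render_round_progress : Prop := ∀ (current_round : Int) (total_rounds : Int), Dom_render_round_progress current_round total_rounds → Spec_render_round_progress current_round total_rounds (render_round_progress current_round total_rounds)

-- ===== LEMMAS AND PROOFS =====

theorem pv_pill_eq : pvPillA = pvPillB := rfl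

theorem pv_lists_eq (c t : Int) :
    (PySem.List.pyRange 1 (t + 1) 1).map (fun r =>
      pvPillA (if r < c then "round-pill round-done"
        else if r = c then "round-pill round-active"
        else "round-pill round-pending") r)
    = (PySem.List.pyRange 1 (min c (t + 1)) 1).map (fun r => pvPillB "round-pill round-done" r)
      ++ (if 1 ≤ c ∧ c ≤ t then [pvPillB "round-pill round-active" c] else [])
      ++ (PySem.List.pyRange (max (c + 1) 1) (t + 1) 1).map
          (fun r => pvPillB "round-pill round-pending" r) := by
  rw [pv_pill_eq]
  by_cases h1 : c ≤ 0
  · -- everything pending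
    rw [if_neg (by omega),
        PySem.List.pyRange_one_eq_nil (a := 1) (b := min c (t + 1)) (by omega),
        max_eq_right (by omega : c + 1 ≤ 1)]
    simp only [List.map_nil, List.nil_append]
    exact List.map_congr_left (fun r hr => by
      have := (PySem.List.mem_pyRange_one).1 hr
      rw [if_neg (by omega), if_neg (by omega)])
  · by_cases h2 : t < c
    · -- everything done
      rw [if_neg (by omega), min_eq_right (by omega : t + 1 ≤ c),
          PySem.List.pyRange_one_eq_nil (a := max (c + 1) 1) (b := t + 1) (by omega)]
      simp only [List.map_nil, List.append_nil]
      exact (List.map_congr_left (fun r hr => by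
        have := (PySem.List.mem_pyRange_one).1 hr
        rw [if_pos (by omega)])).symm
    · -- 1 ≤ c ≤ t : three segments
      rw [if_pos ⟨by omega, by omega⟩, min_eq_left (by omega : c ≤ t + 1),
          max_eq_left (by omega : (1:Int) ≤ c + 1),
          PySem.List.pyRange_one_append 1 c (t + 1) (by omega) (by omega),
          PySem.List.pyRange_one_append c (c + 1) (t + 1) (by omega) (by omega),
          PySem.List.pyRange_one_singleton]
      simp only [List.map_append, List.map_cons, List.map_nil, List.append_assoc]
      congr 1
      · exact List.map_congr_left (fun r hr => by
          have := (PySem.List.mem_pyRange_one).1 hr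
          rw [if_pos (by omega)])
      congr 1
      · simp
      · exact List.map_congr_left (fun r hr => by
          have := (PySem.List.mem_pyRange_one).1 hr
          rw [if_neg (by omega), if_neg (by omega)])

-- ===== VERDICT (by name: the statement is the Claim_ definition above) =====
theorem render_round_progress_spec : Claim_equal_render_round_progress := by
  intro c t _
  unfold Spec_render_round_progress render_round_progress render_round_progress_alt
  simp only [PySem.List.foldl_append_singleton_eq_map]
  exact congrArg (PySem.Str.join "") (pv_lists_eq c t)
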